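-- pv_equiv track=rewrite | github.com/KangerDrew/yeetCode | assortedProblems/tree/...recoverBinarySearchTree.py | find_two_swapped
-- ===== SOURCE A (Python) =====
-- def find_two_swapped(nums):
--
--     n1 = n2 = None
--
--     for i in range(len(nums) - 1):
--
--         if nums[i + 1] < nums[i]:
--             n2 = nums[i + 1]
--
--             if n1 is None:
--                 n1 = nums[i]
--             else:
--                 break
--
--     return n1, n2
-- ===== SOURCE B (Python) =====
-- def find_two_swapped(nums):
--     d = [i for i in range(len(nums) - 1) if nums[i + 1] < nums[i]]
--     if not d:
--         return None, None
--     n1 = nums[d[0]]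
--     n2 = nums[d[1] + 1] if len(d) >= 2 else nums[d[0] + 1]
--     return n1, n2
-- ===== Notes on version B (the rewrite author's own statement) =====
-- stated objective: alternative
-- what changed: Replaces the single-pass accumulator loop with early break by a filter-then-select decomposition: collect all descent indices, then read the answer off the first (and, if present, second) descent.
import Mathlib
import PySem

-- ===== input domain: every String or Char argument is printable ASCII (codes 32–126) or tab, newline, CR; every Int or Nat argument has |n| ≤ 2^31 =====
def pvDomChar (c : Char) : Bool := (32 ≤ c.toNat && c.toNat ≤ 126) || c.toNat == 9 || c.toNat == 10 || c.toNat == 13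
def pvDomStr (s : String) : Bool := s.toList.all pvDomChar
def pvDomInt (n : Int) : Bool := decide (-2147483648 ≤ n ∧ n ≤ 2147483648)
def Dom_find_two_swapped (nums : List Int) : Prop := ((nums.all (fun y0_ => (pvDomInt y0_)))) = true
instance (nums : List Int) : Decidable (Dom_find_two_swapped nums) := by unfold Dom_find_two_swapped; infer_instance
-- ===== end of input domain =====

-- B replaces A's single-pass accumulator loop (with early break) by a filter-then-select
-- decomposition over the list of descent indices; same O(n) cost, different structure.


-- ===== PORT A =====
-- loop over the indices of range(len(nums)-1), carrying (n1, n2); the 'break' is the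
-- non-recursive branch.  nums[i] is in range for every i the loop visits, so pyGetD _ _ 0 is exact.
def ftsLoopA (nums : List Int) : List Int → Option Int → Option Int → Option Int × Option Int
  | [], n1, n2 => (n1, n2)
  | i :: rest, n1, _n2 =>
    if PySem.List.pyGetD nums (i + 1) 0 < PySem.List.pyGetD nums i 0 then
      match n1 with
      | none => ftsLoopA nums rest (some (PySem.List.pyGetD nums i 0)) (some (PySem.List.pyGetD nums (i + 1) 0))
      | some a => (some a, some (PySem.List.pyGetD nums (i + 1) 0))   -- break
    else ftsLoopA nums rest n1 _n2

def find_two_swapped (nums : List Int) : Option Int × Option Int :=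
  ftsLoopA nums (PySem.List.pyRange 0 (PySem.List.len nums - 1) 1) none none

-- ===== PORT B =====
def find_two_swapped_alt (nums : List Int) : Option Int × Option Int :=
  let d := (PySem.List.pyRange 0 (PySem.List.len nums - 1) 1).filter
    (fun i => decide (PySem.List.pyGetD nums (i + 1) 0 < PySem.List.pyGetD nums i 0))
  match d with
  | [] => (none, none)
  | [i0] => (some (PySem.List.pyGetD nums i0 0), some (PySem.List.pyGetD nums (i0 + 1) 0))
  | i0 :: i1 :: _ => (some (PySem.List.pyGetD nums i0 0), some (PySem.List.pyGetD nums (i1 + 1) 0))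

-- ===== PRECONDITION & SPEC =====
def Spec_find_two_swapped (nums : List Int) (out : Option Int × Option Int) : Prop := out = find_two_swapped_alt nums
instance (nums : List Int) (out : Option Int × Option Int) : Decidable (Spec_find_two_swapped nums out) := by unfold Spec_find_two_swapped; infer_instance

-- ===== CLAIM (what is proved, stated in full; the proofs are below) =====
def Claim_equal_find_two_swapped : Prop := ∀ (nums : List Int), Dom_find_two_swapped nums → Spec_find_two_swapped nums (find_two_swapped nums)

-- ===== LEMMAS AND PROOFS =====

-- Once n1 is set, A breaks at the next descent: the result's second component is
-- determined by the FIRST descent of the remaining indices.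
theorem ftsLoopA_some (nums : List Int) (idxs : List Int) (a : Int) (b : Option Int) :
    ftsLoopA nums idxs (some a) b =
      (some a,
        match idxs.filter (fun i => decide (PySem.List.pyGetD nums (i + 1) 0 < PySem.List.pyGetD nums i 0)) with
        | [] => b
        | j :: _ => some (PySem.List.pyGetD nums (j + 1) 0)) := by
  induction idxs generalizing b with
  | nil => simp [ftsLoopA]
  | cons i rest ih =>
    by_cases h : PySem.List.pyGetD nums (i + 1) 0 < PySem.List.pyGetD nums i 0
    · simp [ftsLoopA, h]
    · simp [ftsLoopA, h, ih]

-- From the initial (None, None) state, A computes B's filter-then-select value.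
theorem ftsLoopA_none (nums : List Int) (idxs : List Int) :
    ftsLoopA nums idxs none none =
      (match idxs.filter (fun i => decide (PySem.List.pyGetD nums (i + 1) 0 < PySem.List.pyGetD nums i 0)) with
        | [] => (none, none)
        | [i0] => (some (PySem.List.pyGetD nums i0 0), some (PySem.List.pyGetD nums (i0 + 1) 0))
        | i0 :: i1 :: _ => (some (PySem.List.pyGetD nums i0 0), some (PySem.List.pyGetD nums (i1 + 1) 0))) := by
  induction idxs with
  | nil => simp [ftsLoopA]
  | cons i rest ih =>
    by_cases h : PySem.List.pyGetD nums (i + 1) 0 < PySem.List.pyGetD nums i 0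
    · simp only [ftsLoopA, if_pos h, List.filter_cons, decide_eq_true h, ftsLoopA_some]
      cases rest.filter (fun i => decide (PySem.List.pyGetD nums (i + 1) 0 < PySem.List.pyGetD nums i 0)) <;> simp
    · simp only [ftsLoopA, if_neg h, List.filter_cons, decide_eq_false h, ih,
        Bool.false_eq_true, if_false]

-- ===== VERDICT (by name: the statement is the Claim_ definition above) =====
theorem find_two_swapped_spec : Claim_equal_find_two_swapped := by
  intro nums _
  unfold Spec_find_two_swapped find_two_swapped find_two_swapped_alt
  exact ftsLoopA_none nums _
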